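-- pv_equiv track=rewrite | github.com/meyer1994/grammar | grammar/grammar.py | _get_factor_part
-- ===== SOURCE A (Python) =====
-- def _get_factor_part(factors):
--     '''
--     Returns the factorable part of productions.
--     '''
--     smallest_size = min(map(lambda i: len(i), factors))
--
--     base_prod = factors.pop()
--     factors.add(base_prod)
--
--     factor_part = []
--     for i in range(smallest_size):
--         symbol = base_prod[i]
--         for factor in factors:
--             if factor[i] != symbol:
--                 return factor_part
--         factor_part.append(symbol)
--     return factor_part
-- ===== SOURCE B (Python) =====
-- def _get_factor_part(factors):
--     # Fold a pairwise longest-common-prefix over the productions: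
--     # start from one production and shrink the running prefix against each other one.
--     it = iter(factors)
--     prefix = list(next(it))
--     for prod in it:
--         n = 0
--         for a, b in zip(prefix, prod):
--             if a != b:
--                 break
--             n += 1
--         prefix = prefix[:n]
--     return prefix
-- ===== Notes on version B (the rewrite author's own statement) =====
-- stated objective: simpler
-- what changed: B folds a pairwise longest-common-prefix over the productions (shrinking one running prefix), replacing A's precomputed minimum length plus position-indexed double loop over all productions at each index.
import Mathlib
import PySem

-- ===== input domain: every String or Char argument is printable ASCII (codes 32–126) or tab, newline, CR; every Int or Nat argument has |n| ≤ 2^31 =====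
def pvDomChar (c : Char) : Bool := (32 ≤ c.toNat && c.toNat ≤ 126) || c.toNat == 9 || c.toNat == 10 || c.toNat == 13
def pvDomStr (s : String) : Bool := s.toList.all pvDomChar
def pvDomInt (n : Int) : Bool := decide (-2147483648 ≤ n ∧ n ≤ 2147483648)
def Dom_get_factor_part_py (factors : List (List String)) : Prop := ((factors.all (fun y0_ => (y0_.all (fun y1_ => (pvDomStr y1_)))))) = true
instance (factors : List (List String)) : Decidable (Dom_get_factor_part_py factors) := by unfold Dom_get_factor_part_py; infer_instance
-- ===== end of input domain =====

-- B replaces A's min-length + position-indexed double loop by a pairwise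
-- longest-common-prefix fold over the productions (objective: simpler).
-- Python A mutates the set only transiently (pop then add back), so it is unchanged on return.


-- ===== PORT A =====
-- 'for i in range(smallest_size): … for factor in factors: if factor[i] != symbol: return factor_part'
-- k counts the remaining range iterations, i is the current index; the inner for-loop with
-- early return is the all-check (every factor[i] is in range because i < smallest_size ≤ len factor,
-- so Python never raises IndexError there).
def pvLoopA (factors : List (List String)) (base : List String) : Nat → Nat → List String
  | _, 0 => []
  | i, k+1 =>
    match base[i]? with
    | none => []      -- unreachable: i < smallest_size ≤ len base
    | some symbol =>
      if factors.all (fun g => g[i]? == some symbol)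
      then symbol :: pvLoopA factors base (i+1) k
      else []

-- A: smallest_size = min(map(len, factors)); base_prod = factors.pop(); factors.add(base_prod);
-- then the index loop above.  min() on an empty set raises ValueError (excluded by Pre_);
-- set.pop() returns an arbitrary element, modelled as the first one (the result is the
-- common-prefix test against ALL factors at each index, so it does not depend on this choice).
def get_factor_part_py (factors : List (List String)) : List String :=
  match factors with
  | [] => []          -- min(()) raises ValueError; outside Pre_
  | f :: rest =>
    let smallest_size := (rest.map List.length).foldl Nat.min f.length
    pvLoopA (f :: rest) f 0 smallest_size

-- ===== PORT B =====
-- inner zip-and-break loop of Source B: length of the agreeing prefix of two lists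
def pvLcpLen : List String → List String → Nat
  | a :: xs, b :: ys => if a = b then pvLcpLen xs ys + 1 else 0
  | _, _ => 0

-- B: prefix = first production; for each other production, prefix = prefix[:n] with n the zip-count.
def get_factor_part_py_alt (factors : List (List String)) : List String :=
  match factors with
  | [] => []          -- next(iter(factors)) raises StopIteration in Source B; outside Pre_
  | f :: rest => rest.foldl (fun pre prod => pre.take (pvLcpLen pre prod)) f

-- ===== PRECONDITION & SPEC =====
-- Python A raises ValueError (min of an empty sequence) on the empty set; only that is excluded.
def Pre_get_factor_part_py (factors : List (List String)) : Prop := factors ≠ []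
instance (factors : List (List String)) : Decidable (Pre_get_factor_part_py factors) := by unfold Pre_get_factor_part_py; infer_instance

def pvWitness_get_factor_part_py : List (List String) := [["a", "b"], ["a", "c"]]

def Spec_get_factor_part_py (factors : List (List String)) (out : List String) : Prop := out = get_factor_part_py_alt factors
instance (factors : List (List String)) (out : List String) : Decidable (Spec_get_factor_part_py factors out) := by unfold Spec_get_factor_part_py; infer_instance

-- ===== CLAIM (what is proved, stated in full; the proofs are below) =====
def Claim_equal_get_factor_part_py : Prop := ∀ (factors : List (List String)), Dom_get_factor_part_py factors → Pre_get_factor_part_py factors → Spec_get_factor_part_py factors (get_factor_part_py factors)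

-- ===== LEMMAS AND PROOFS =====

theorem pvLcpLen_le_right (xs ys : List String) : pvLcpLen xs ys ≤ ys.length := by
  induction xs generalizing ys with
  | nil => simp [pvLcpLen]
  | cons a xs ih =>
    cases ys with
    | nil => simp [pvLcpLen]
    | cons b ys =>
      simp only [pvLcpLen]
      split
      · have := ih ys; simp only [List.length_cons]; omega
      · simp

theorem pvLcpLen_take_left (xs ys : List String) (n : Nat) :
    pvLcpLen (xs.take n) ys = min n (pvLcpLen xs ys) := by
  induction xs generalizing ys n with
  | nil => simp [pvLcpLen]
  | cons a xs ih =>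
    cases n with
    | zero => simp [pvLcpLen]
    | succ n =>
      cases ys with
      | nil => simp [pvLcpLen]
      | cons b ys =>
        simp only [List.take_succ_cons, pvLcpLen]
        split
        · rw [ih]; omega
        · simp

theorem pvLcpLen_agree (xs ys : List String) (j : Nat) (hj : j < pvLcpLen xs ys) :
    ys[j]? = xs[j]? := by
  induction xs generalizing ys j with
  | nil => simp [pvLcpLen] at hj
  | cons a xs ih =>
    cases ys with
    | nil => simp [pvLcpLen] at hj
    | cons b ys =>
      simp only [pvLcpLen] at hj
      split at hj
      · cases j with
        | zero => simp_all
        | succ j => simpa using ih ys j (by omega)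
      · omega

theorem pvLcpLen_ne (xs ys : List String)
    (hx : pvLcpLen xs ys < xs.length) (hy : pvLcpLen xs ys < ys.length) :
    ys[pvLcpLen xs ys]? ≠ xs[pvLcpLen xs ys]? := by
  induction xs generalizing ys with
  | nil => simp [pvLcpLen] at hx
  | cons a xs ih =>
    cases ys with
    | nil => simp [pvLcpLen] at hy
    | cons b ys =>
      simp only [pvLcpLen] at hx hy ⊢
      split
      · next h =>
        rw [if_pos h] at hx hy
        simp only [List.length_cons] at hx hy
        simpa using ih ys (by omega) (by omega)
      · next h => simpa using fun hba => h hba.symm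

-- generic facts about the key-min fold used for smallest_size and for K
theorem foldMin_le_init {α : Type} (c : α → Nat) (l : List α) (n : Nat) :
    l.foldl (fun a q => min a (c q)) n ≤ n := by
  induction l generalizing n with
  | nil => simp
  | cons q l ih => exact le_trans (ih _) (Nat.min_le_left _ _)

theorem foldMin_le_mem {α : Type} (c : α → Nat) (l : List α) (n : Nat)
    (g : α) (hg : g ∈ l) : l.foldl (fun a q => min a (c q)) n ≤ c g := by
  induction l generalizing n with
  | nil => simp at hg
  | cons q l ih =>
    simp only [List.foldl_cons]
    rcases List.mem_cons.mp hg with h | h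
    · subst h; exact le_trans (foldMin_le_init _ _ _) (Nat.min_le_right _ _)
    · exact ih _ h

theorem foldMin_attained {α : Type} (c : α → Nat) (l : List α) (n : Nat) :
    l.foldl (fun a q => min a (c q)) n = n ∨
      ∃ g ∈ l, l.foldl (fun a q => min a (c q)) n = c g := by
  induction l generalizing n with
  | nil => simp
  | cons q l ih =>
    rcases ih (min n (c q)) with h | ⟨g, hg, h⟩
    · rcases Nat.le_total n (c q) with hle | hle
      · left; simpa [Nat.min_eq_left hle] using h
      · right; exact ⟨q, by simp, by simpa [Nat.min_eq_right hle] using h⟩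
    · right; exact ⟨g, by simp [hg], h⟩

theorem foldMin_mono {α : Type} (c₁ c₂ : α → Nat) (l : List α) (n₁ n₂ : Nat)
    (hn : n₁ ≤ n₂) (hc : ∀ g ∈ l, c₁ g ≤ c₂ g) :
    l.foldl (fun a q => min a (c₁ q)) n₁ ≤ l.foldl (fun a q => min a (c₂ q)) n₂ := by
  induction l generalizing n₁ n₂ with
  | nil => simpa
  | cons q l ih =>
    refine ih _ _ ?_ (fun g hg => hc g (by simp [hg]))
    have := hc q (by simp)
    dsimp only
    omega

-- characterisation of B's fold: it keeps a prefix of the first production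
theorem foldB_take (f : List String) (rest : List (List String)) (n : Nat) :
    rest.foldl (fun pre prod => pre.take (pvLcpLen pre prod)) (f.take n) =
      f.take (rest.foldl (fun a q => min a (pvLcpLen f q)) n) := by
  induction rest generalizing n with
  | nil => simp
  | cons q rest ih =>
    simp only [List.foldl_cons]
    rw [pvLcpLen_take_left, List.take_take]
    rw [show min (min n (pvLcpLen f q)) n = min n (pvLcpLen f q) by omega]
    exact ih _

-- characterisation of A's loop, given agreement below K and a disagreement at K
theorem pvLoopA_spec (factors : List (List String)) (f : List String) (K m : Nat)
    (hmf : m ≤ f.length)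
    (hK : ∀ g ∈ factors, ∀ j, j < K → g[j]? = f[j]?)
    (hne : K < m → ∃ g ∈ factors, g[K]? ≠ f[K]?) :
    ∀ k i, i + k ≤ m → i ≤ K →
      pvLoopA factors f i k = (f.drop i).take (min k (K - i)) := by
  intro k
  induction k with
  | zero => intro i _ _; simp [pvLoopA]
  | succ k ih =>
    intro i hik hiK
    have hif : i < f.length := by omega
    have hfi : f[i]? = some f[i] := List.getElem?_eq_getElem hif
    rcases Nat.lt_or_ge i K with hlt | hge
    · -- all factors agree at index i
      have hall : factors.all (fun g => g[i]? == some f[i]) = true := by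
        simp only [List.all_eq_true, beq_iff_eq]
        intro g hg
        rw [hK g hg i hlt, hfi]
      simp only [pvLoopA, hfi, hall, if_true]
      rw [ih (i+1) (by omega) (by omega)]
      have hdrop : f.drop i = f[i] :: f.drop (i+1) := (List.getElem_cons_drop hif).symm
      rw [hdrop]
      have h1 : min (k+1) (K - i) = min k (K - (i+1)) + 1 := by omega
      rw [h1, List.take_succ_cons]
    · -- i = K: some factor disagrees at K
      have hiK' : i = K := by omega
      subst hiK'
      rcases hne (by omega) with ⟨g, hg, hgne⟩
      have hall : factors.all (fun g => g[i]? == some f[i]) = false := by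
        simp only [List.all_eq_false]
        exact ⟨g, hg, by simpa [beq_iff_eq, hfi] using hgne⟩
      simp only [pvLoopA, hfi, hall]
      simp

-- ===== VERDICT (by name: the statement is the Claim_ definition above) =====
theorem get_factor_part_py_spec : Claim_equal_get_factor_part_py := by
  intro factors _ hpre
  unfold Spec_get_factor_part_py
  match factors with
  | [] => exact absurd rfl hpre
  | f :: rest =>
    unfold get_factor_part_py get_factor_part_py_alt
    simp only
    set m := (rest.map List.length).foldl Nat.min f.length with hm
    set K := rest.foldl (fun a q => min a (pvLcpLen f q)) f.length with hKdef
    have hmin_eq : (rest.map List.length).foldl Nat.min f.length =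
        rest.foldl (fun a q => min a (List.length q)) f.length := by
      rw [List.foldl_map]
    have hmf : m ≤ f.length := by
      rw [hm, hmin_eq]; exact foldMin_le_init _ _ _
    have hKf : K ≤ f.length := foldMin_le_init _ _ _
    have hKm : K ≤ m := by
      rw [hm, hmin_eq]
      exact foldMin_mono _ _ rest f.length f.length le_rfl
        (fun g _ => pvLcpLen_le_right f g)
    have hK : ∀ g ∈ f :: rest, ∀ j, j < K → g[j]? = f[j]? := by
      intro g hg j hj
      rcases List.mem_cons.mp hg with h | h
      · rw [h]
      · exact pvLcpLen_agree f g j (lt_of_lt_of_le hj (foldMin_le_mem _ _ _ g h))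
    have hne : K < m → ∃ g ∈ f :: rest, g[K]? ≠ f[K]? := by
      intro hKltm
      rcases foldMin_attained (fun q => pvLcpLen f q) rest f.length with h | ⟨g, hg, h⟩
      · rw [← hKdef] at h; omega
      · rw [← hKdef] at h
        refine ⟨g, by simp [hg], ?_⟩
        have hgm : m ≤ g.length := by
          rw [hm, hmin_eq]; exact foldMin_le_mem _ _ _ g hg
        rw [h]
        exact pvLcpLen_ne f g (by omega) (by omega)
    have hA := pvLoopA_spec (f :: rest) f K m hmf hK hne m 0 (by omega) (by omega)
    simp only [List.drop_zero, Nat.sub_zero] at hA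
    rw [hA, Nat.min_eq_right hKm]
    conv_rhs => rw [show f = f.take f.length by simp]
    rw [foldB_take]
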